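-- pv_equiv track=rewrite | github.com/sayali1004/AI_sentiment | pipeline/transform.py | select_most_mentioned
-- ===== SOURCE A (Python) =====
-- from collections import Counter
--
-- def select_most_mentioned(locations: list[dict]) -> dict | None:
--     """Pick the most frequently appearing location by (country_code, name)."""
--     if not locations:
--         return None
--     counts = Counter((loc["country_code"], loc["name"]) for loc in locations)
--     most_common_key = counts.most_common(1)[0][0]
--     for loc in locations:
--         if (loc["country_code"], loc["name"]) == most_common_key:
--             return loc
--     return None
-- ===== SOURCE B (Python) =====
-- def select_most_mentioned(locations: list[dict]) -> dict | None:
--     """Pick the most frequently appearing location by (country_code, name).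
--
--     No hash counting: list out the keys once, then sweep the locations with a
--     running strict maximum of key.count(); the first location whose key's total
--     count beats every earlier one is exactly the first occurrence of the
--     earliest-inserted most-common key (Counter.most_common's tie-break).
--     """
--     keys = [(loc["country_code"], loc["name"]) for loc in locations]
--     best, best_count = None, 0
--     for loc, key in zip(locations, keys):
--         c = keys.count(key)
--         if c > best_count:
--             best, best_count = loc, c
--     return best
-- ===== Notes on version B (the rewrite author's own statement) =====
-- stated objective: alternative
-- what changed: B drops the Counter hash-count and the final re-scan entirely: it keeps a running strict maximum of keys.count(key) while sweeping the locations once, so the first location whose key's total count exceeds all earlier ones (= the first occurrence of the earliest-inserted most-common key) is returned directly; it trades the O(n) hashing of A for brute-force O(n^2) counting.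
import Mathlib
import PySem

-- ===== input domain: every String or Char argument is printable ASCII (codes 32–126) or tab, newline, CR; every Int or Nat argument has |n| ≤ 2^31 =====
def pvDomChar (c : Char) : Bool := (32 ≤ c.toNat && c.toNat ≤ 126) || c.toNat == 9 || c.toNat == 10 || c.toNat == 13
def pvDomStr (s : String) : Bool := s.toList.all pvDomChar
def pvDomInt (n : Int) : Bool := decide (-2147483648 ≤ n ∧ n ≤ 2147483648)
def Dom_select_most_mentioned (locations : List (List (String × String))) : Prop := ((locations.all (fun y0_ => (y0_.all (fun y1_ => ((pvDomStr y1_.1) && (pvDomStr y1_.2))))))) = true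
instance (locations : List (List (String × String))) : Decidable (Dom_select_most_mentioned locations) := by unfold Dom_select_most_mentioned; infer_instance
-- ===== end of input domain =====

-- B replaces A's Counter + most_common(1) + re-scan with a single sweep keeping a running
-- strict maximum of keys.count(key), returning the winning location directly (no hash
-- counting; brute-force counting instead). Objective: alternative algorithm (not faster).

-- (loc["country_code"], loc["name"]) — both Pythons compute this key; .getD "" is only
-- reached on inputs outside Pre_ (where the Python raises KeyError).
def pvKey (loc : List (String × String)) : String × String :=
  (((PySem.Dict.mk loc).get? "country_code").getD "", ((PySem.Dict.mk loc).get? "name").getD "")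

-- ===== PORT A =====
-- the 'for loc in locations: if key(loc) == most_common_key: return loc / return None' loop
def aFind (k : String × String) : List (List (String × String)) → Option (List (String × String))
  | [] => none
  | loc :: rest => if pvKey loc = k then some loc else aFind k rest

def select_most_mentioned (locations : List (List (String × String))) : Option (List (String × String)) :=
  if locations = [] then none
  else
    let counts := PySem.Dict.counter (locations.map pvKey)
    -- counts.most_common(1)[0][0]: nlargest(1, items, key=count) = first maximal item
    match PySem.List.max? counts.items (fun p => p.2) with
    | none => none  -- unreachable: counts is nonempty when locations is
    | some mc => aFind mc.1 locations

-- ===== PORT B =====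
-- keys = [key(loc) …]; then one pass 'for loc, key in zip(locations, keys):
--   c = keys.count(key); if c > best_count: best, best_count = loc, c; return best'
def select_most_mentioned_alt (locations : List (List (String × String))) : Option (List (String × String)) :=
  let keys := locations.map pvKey
  ((locations.zip keys).foldl
    (fun m p =>
      if m.2 < (PySem.List.count keys p.2 : Int) then (some p.1, (PySem.List.count keys p.2 : Int)) else m)
    ((none : Option (List (String × String))), (0 : Int))).1

-- ===== PRECONDITION & SPEC =====
-- Pre_ excludes exactly the inputs where Python A raises KeyError: some location dict
-- lacking the "country_code" or "name" key (B raises there too).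
def Pre_select_most_mentioned (locations : List (List (String × String))) : Prop :=
  (locations.all (fun loc =>
    ((PySem.Dict.mk loc).get? "country_code").isSome
      && ((PySem.Dict.mk loc).get? "name").isSome)) = true
instance (locations : List (List (String × String))) : Decidable (Pre_select_most_mentioned locations) := by unfold Pre_select_most_mentioned; infer_instance

def pvWitness_select_most_mentioned : (List (List (String × String))) :=
  [[("country_code", "US"), ("name", "NYC")], [("country_code", "US"), ("name", "NYC")]]

def Spec_select_most_mentioned (locations : List (List (String × String))) (out : Option (List (String × String))) : Prop := out = select_most_mentioned_alt locations
instance (locations : List (List (String × String))) (out : Option (List (String × String))) : Decidable (Spec_select_most_mentioned locations out) := by unfold Spec_select_most_mentioned; infer_instance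

-- ===== CLAIM (what is proved, stated in full; the proofs are below) =====
def Claim_equal_select_most_mentioned : Prop := ∀ (locations : List (List (String × String))), Dom_select_most_mentioned locations → Pre_select_most_mentioned locations → Spec_select_most_mentioned locations (select_most_mentioned locations)

-- ===== LEMMAS AND PROOFS =====

-- the sublist of first occurrences of each key, given the keys already seen
def firstOccs : List (List (String × String)) → List (String × String) → List (List (String × String))
  | [], _ => []
  | l :: t, seen =>
      if pvKey l ∈ seen then firstOccs t seen else l :: firstOccs t (seen ++ [pvKey l])

-- B's loop body, with the (fixed) total-count function c
def bStep (c : String × String → Int)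
    (m : Option (List (String × String)) × Int) (l : List (String × String)) :
    Option (List (String × String)) × Int :=
  if m.2 < c (pvKey l) then (some l, c (pvKey l)) else m

-- first element of e0 :: xs with (strictly) maximal c ∘ pvKey
def argL (c : String × String → Int) (xs : List (List (String × String)))
    (e0 : List (String × String)) : List (String × String) :=
  xs.foldl (fun b l => if c (pvKey b) < c (pvKey l) then l else b) e0

-- max(xs, key) on a nonempty list is the running first-maximum loop
theorem max?_cons_key {α : Type} (key : α → Int) (x : α) (t : List α) :
    PySem.List.max? (x :: t) key
      = some (t.foldl (fun m y => if key m < key y then y else m) x) := by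
  have aux : ∀ (t : List α) (m : α),
      t.foldl (fun acc x => match acc with
        | none => some x
        | some m => if key m < key x then some x else some m) (some m)
        = some (t.foldl (fun m y => if key m < key y then y else m) m) := by
    intro t
    induction t with
    | nil => intro m; rfl
    | cons a t ih =>
      intro m
      simp only [List.foldl_cons]
      by_cases h : key m < key a
      · simp only [h, if_pos]; exact ih a
      · simp only [h, if_neg, not_false_iff]; exact ih m
  simp only [PySem.List.max?, List.foldl_cons]
  exact aux t x

-- duplicates of an already-seen key never beat the running maximum
theorem bfold_firstOccs (c : String × String → Int) :
    ∀ (locs : List (List (String × String))) (seen : List (String × String))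
      (m : Option (List (String × String)) × Int),
      (∀ k ∈ seen, c k ≤ m.2) →
      locs.foldl (bStep c) m = (firstOccs locs seen).foldl (bStep c) m := by
  intro locs
  induction locs with
  | nil => intro seen m _; rfl
  | cons l t ih =>
    intro seen m hm
    by_cases hs : pvKey l ∈ seen
    · have hcond : ¬ m.2 < c (pvKey l) := not_lt.mpr (hm _ hs)
      simp only [firstOccs, hs, if_pos, List.foldl_cons, bStep, hcond, if_neg, not_false_iff]
      exact ih seen m hm
    · simp only [firstOccs, hs, if_neg, not_false_iff, List.foldl_cons]
      refine ih (seen ++ [pvKey l]) (bStep c m l) ?_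
      intro k hk
      rcases List.mem_append.mp hk with hk | hk
      · refine le_trans (hm k hk) ?_
        unfold bStep; split_ifs with h
        · exact le_of_lt h
        · exact le_refl _
      · have : k = pvKey l := by simpa using hk
        subst this
        unfold bStep; split_ifs with h
        · exact le_refl _
        · exact not_lt.mp h

theorem key_not_seen :
    ∀ (locs : List (List (String × String))) (seen : List (String × String)),
      ∀ w ∈ firstOccs locs seen, pvKey w ∉ seen := by
  intro locs
  induction locs with
  | nil => intro seen w hw; simp [firstOccs] at hw
  | cons l t ih =>
    intro seen w hw
    by_cases hs : pvKey l ∈ seen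
    · simp only [firstOccs, hs, if_pos] at hw
      exact ih seen w hw
    · simp only [firstOccs, hs, if_neg, not_false_iff, List.mem_cons] at hw
      rcases hw with rfl | hw
      · exact hs
      · intro hmem
        exact ih (seen ++ [pvKey l]) w hw (List.mem_append_left _ hmem)

theorem aFind_firstOccs :
    ∀ (locs : List (List (String × String))) (seen : List (String × String))
      (k : String × String), k ∉ seen →
      aFind k (firstOccs locs seen) = aFind k locs := by
  intro locs
  induction locs with
  | nil => intro seen k _; rfl
  | cons l t ih =>
    intro seen k hk
    by_cases hs : pvKey l ∈ seen
    · have hne : pvKey l ≠ k := fun h => hk (h ▸ hs)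
      simp only [firstOccs, hs, if_pos, aFind, hne, if_neg, not_false_iff]
      exact ih seen k hk
    · by_cases he : pvKey l = k
      · subst he
        simp [firstOccs, hs, aFind]
      · simp only [firstOccs, hs, if_neg, not_false_iff, aFind, he]
        refine ih (seen ++ [pvKey l]) k ?_
        intro hmem
        rcases List.mem_append.mp hmem with h | h
        · exact hk h
        · exact he (List.mem_singleton.mp h).symm

theorem aFind_self :
    ∀ (locs : List (List (String × String))) (seen : List (String × String)),
      ∀ w ∈ firstOccs locs seen, aFind (pvKey w) (firstOccs locs seen) = some w := by
  intro locs
  induction locs with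
  | nil => intro seen w hw; simp [firstOccs] at hw
  | cons l t ih =>
    intro seen w hw
    by_cases hs : pvKey l ∈ seen
    · simp only [firstOccs, hs, if_pos] at hw ⊢
      exact ih seen w hw
    · simp only [firstOccs, hs, if_neg, not_false_iff, List.mem_cons] at hw ⊢
      rcases hw with rfl | hw
      · simp [aFind]
      · have hne : pvKey w ≠ pvKey l := by
          intro h
          exact key_not_seen t (seen ++ [pvKey l]) w hw
            (List.mem_append_right _ (by simp [h]))
        have hne' : ¬ pvKey l = pvKey w := fun h => hne h.symm
        simp only [aFind, hne', if_neg, not_false_iff]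
        exact ih (seen ++ [pvKey l]) w hw

-- A's running maximum over the (key, count) pairs of the first occurrences
theorem argA (c : String × String → Int) :
    ∀ (xs : List (List (String × String))) (e0 : List (String × String)),
      xs.foldl (fun (m : (String × String) × Int) w =>
          if m.2 < c (pvKey w) then (pvKey w, c (pvKey w)) else m)
        (pvKey e0, c (pvKey e0))
      = (pvKey (argL c xs e0), c (pvKey (argL c xs e0))) := by
  intro xs
  induction xs with
  | nil => intro e0; rfl
  | cons a t ih =>
    intro e0
    simp only [argL, List.foldl_cons]
    by_cases h : c (pvKey e0) < c (pvKey a) <;> simp only [h, if_pos, if_neg, not_false_iff]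
    · exact ih a
    · exact ih e0

-- B's running maximum over the first occurrences themselves
theorem argB (c : String × String → Int) :
    ∀ (xs : List (List (String × String))) (e0 : List (String × String)),
      xs.foldl (bStep c) (some e0, c (pvKey e0))
      = (some (argL c xs e0), c (pvKey (argL c xs e0))) := by
  intro xs
  induction xs with
  | nil => intro e0; rfl
  | cons a t ih =>
    intro e0
    simp only [argL, List.foldl_cons, bStep]
    by_cases h : c (pvKey e0) < c (pvKey a) <;> simp only [h, if_pos, if_neg, not_false_iff]
    · exact ih a
    · exact ih e0

theorem argL_mem (c : String × String → Int) (xs : List (List (String × String)))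
    (e0 : List (String × String)) : argL c xs e0 ∈ e0 :: xs := by
  induction xs generalizing e0 with
  | nil => simp [argL]
  | cons a t ih =>
    have hstep : argL c (a :: t) e0 = argL c t (if c (pvKey e0) < c (pvKey a) then a else e0) := by
      simp only [argL, List.foldl_cons]
    rw [hstep]
    rcases List.mem_cons.mp (ih (if c (pvKey e0) < c (pvKey a) then a else e0)) with h2 | h2
    · rw [h2]; split_ifs <;> simp
    · simp [h2]

-- the distinct keys in first-occurrence order are the keys of firstOccs
theorem update_map_firstOccs :
    ∀ (locs : List (List (String × String))) (s : List (String × String)),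
      PySem.Set.update s (locs.map pvKey) = s ++ (firstOccs locs s).map pvKey := by
  intro locs
  induction locs with
  | nil => intro s; simp [firstOccs, PySem.Set.update_nil]
  | cons l t ih =>
    intro s
    rw [List.map_cons, PySem.Set.update_cons]
    by_cases hs : pvKey l ∈ s
    · rw [PySem.Set.add_of_mem hs]
      simp only [firstOccs, hs, if_pos]
      exact ih s
    · rw [PySem.Set.add_of_not_mem hs]
      simp only [firstOccs, hs, if_neg, not_false_iff, List.map_cons]
      rw [ih (s ++ [pvKey l])]
      simp

theorem zip_self_map (locs : List (List (String × String))) :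
    locs.zip (locs.map pvKey) = locs.map (fun l => (l, pvKey l)) := by
  induction locs with
  | nil => rfl
  | cons l t ih => simp [ih]

-- ===== VERDICT (by name: the statement is the Claim_ definition above) =====
theorem select_most_mentioned_spec : Claim_equal_select_most_mentioned := by
  intro locations _ _
  unfold Spec_select_most_mentioned
  cases locations with
  | nil => rfl
  | cons l0 rest =>
    set locs := l0 :: rest with hlocs
    set c : String × String → Int := fun k => ((locs.map pvKey).count k : Int) with hc
    -- the first occurrences: nonempty, headed by l0
    have hF : firstOccs locs [] = l0 :: firstOccs rest [pvKey l0] := by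
      simp [firstOccs, hlocs]
    set xs := firstOccs rest [pvKey l0] with hxs
    set W := argL c xs l0 with hW
    -- B's side
    have hcount : ∀ k, (PySem.List.count (locs.map pvKey) k : Int) = c k := by
      intro k; simp [PySem.List.count_eq, hc]
    have hB : select_most_mentioned_alt locs = some W := by
      simp only [select_most_mentioned_alt]
      rw [zip_self_map, List.foldl_map]
      have hfun : (fun (m : Option (List (String × String)) × Int) (l : List (String × String)) =>
          if m.2 < (PySem.List.count (locs.map pvKey) (pvKey l) : Int)
          then (some l, (PySem.List.count (locs.map pvKey) (pvKey l) : Int)) else m) = bStep c := by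
        funext m l
        simp only [bStep, hcount]
      rw [hfun, bfold_firstOccs c locs [] _ (by simp), hF, List.foldl_cons]
      have h0 : ((none : Option (List (String × String))), (0 : Int)).2 < c (pvKey l0) := by
        have : pvKey l0 ∈ locs.map pvKey := by simp [hlocs]
        have hpos : 0 < (locs.map pvKey).count (pvKey l0) := List.count_pos_iff.mpr this
        simpa [hc] using hpos
      rw [show bStep c (none, 0) l0 = (some l0, c (pvKey l0)) by simp [bStep, h0]]
      rw [argB c xs l0]
    -- A's side
    have hA : select_most_mentioned locs = aFind (pvKey W) locs := by
      simp only [select_most_mentioned]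
      rw [if_neg (show ¬ locs = [] by simp [hlocs])]
      have hitems : (PySem.Dict.counter (locs.map pvKey)).items
          = ((firstOccs locs []).map pvKey).map (fun k => (k, c k)) := by
        rw [PySem.Dict.items_counter]
        have hset : PySem.Set.ofList (locs.map pvKey) = (firstOccs locs []).map pvKey := by
          rw [← PySem.Set.update_nil_left, update_map_firstOccs locs []]
          simp
        rw [hset, hc]
      rw [hitems, hF, List.map_cons, List.map_cons, max?_cons_key]
      simp only [List.foldl_map]
      rw [argA c xs l0]
    rw [hA, hB, ← aFind_firstOccs locs [] (pvKey W) (by simp)]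
    exact aFind_self locs [] W (by rw [hF]; exact argL_mem c xs l0)
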